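-- pv_equiv track=rewrite | github.com/wingedonezero/Video-Sync-GUI | tests/conftest.py | _token_chunks
-- ===== SOURCE A (Python) =====
-- def _token_chunks(tokens: list[str]):
--     """Yield per-input groupings (language/sync/flags/(path)). Helps assertions."""
--     group, acc = [], []
--     for t in tokens:
--         acc.append(t)
--         if t == ')':
--             group.append(acc.copy())
--             acc.clear()
--     return group
-- ===== SOURCE B (Python) =====
-- def _token_chunks(tokens: list[str]):
--     """Yield per-input groupings (language/sync/flags/(path)). Helps assertions."""
--     chunks = []
--     start = 0
--     while True:
--         try:
--             i = tokens.index(')', start)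
--         except ValueError:
--             return chunks
--         chunks.append(tokens[start:i + 1])
--         start = i + 1
-- ===== Notes on version B (the rewrite author's own statement) =====
-- stated objective: alternative
-- what changed: Replaces the token-by-token accumulator loop with repeated list.index(')', start) searches that emit fresh slices tokens[start:i+1]; tokens after the last ')' are never emitted.
import Mathlib
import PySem

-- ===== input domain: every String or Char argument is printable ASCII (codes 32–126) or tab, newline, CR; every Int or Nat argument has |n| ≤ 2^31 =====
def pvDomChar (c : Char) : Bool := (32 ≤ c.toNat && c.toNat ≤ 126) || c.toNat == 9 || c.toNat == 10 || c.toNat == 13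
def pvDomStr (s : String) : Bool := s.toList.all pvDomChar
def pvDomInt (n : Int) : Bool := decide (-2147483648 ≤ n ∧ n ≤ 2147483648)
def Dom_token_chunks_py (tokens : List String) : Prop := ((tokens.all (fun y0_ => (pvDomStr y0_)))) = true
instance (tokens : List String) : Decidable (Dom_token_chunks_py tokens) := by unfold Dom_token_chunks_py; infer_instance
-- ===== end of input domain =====

-- B replaces A's token-by-token accumulator loop with repeated index(')', start) searches
-- that emit fresh slices tokens[start:i+1] (objective: alternative; same O(n) cost).

-- ===== PORT A =====
-- loop body of A: acc.append(t); if t == ')': group.append(acc.copy()); acc.clear()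
def tcStepA (st : List (List String) × List String) (t : String) : List (List String) × List String :=
  let acc := st.2 ++ [t]
  if t = ")" then (st.1 ++ [acc], []) else (st.1, acc)

def token_chunks_py (tokens : List String) : List (List String) :=
  (tokens.foldl tcStepA (([] : List (List String)), ([] : List String))).1

-- ===== PORT B =====
-- Python's tokens.index(')', start) (search starting at offset `start`) has no PySem
-- primitive; it is ported exactly as index? on the suffix tokens[start:], with the
-- absolute index recovered as start + j.  The ValueError branch is the `none` branch.
def tcAltLoop (tokens : List String) (chunks : List (List String)) (start : Nat) :
    List (List String) :=
  match h : PySem.List.index? (PySem.List.slice tokens (some (start : Int)) none) ")" with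
  | none => chunks
  | some j =>
      tcAltLoop tokens
        (chunks ++ [PySem.List.slice tokens (some ((start : Nat) : Int))
                      (some (((start + j + 1 : Nat)) : Int))])
        (start + j + 1)
termination_by tokens.length - start
decreasing_by
  have hj := (PySem.List.getElem_of_index?_eq_some h).1
  rw [PySem.List.slice_from_natCast, List.length_drop] at hj
  omega

def token_chunks_py_alt (tokens : List String) : List (List String) :=
  tcAltLoop tokens [] 0

-- ===== PRECONDITION & SPEC =====
def Spec_token_chunks_py (tokens : List String) (out : List (List String)) : Prop := out = token_chunks_py_alt tokens
instance (tokens : List String) (out : List (List String)) : Decidable (Spec_token_chunks_py tokens out) := by unfold Spec_token_chunks_py; infer_instance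

-- ===== CLAIM (what is proved, stated in full; the proofs are below) =====
def Claim_equal_token_chunks_py : Prop := ∀ (tokens : List String), Dom_token_chunks_py tokens → Spec_token_chunks_py tokens (token_chunks_py tokens)

-- ===== LEMMAS AND PROOFS =====

-- common characterisation: the chunk list, one chunk per leading ')'
def chunksRec (ts : List String) : List (List String) :=
  match h : PySem.List.index? ts ")" with
  | none => []
  | some j => ts.take (j + 1) :: chunksRec (ts.drop (j + 1))
termination_by ts.length
decreasing_by
  have hj := (PySem.List.getElem_of_index?_eq_some h).1
  simp [List.length_drop]
  omega

lemma chunksRec_none {ts : List String} (h : PySem.List.index? ts ")" = none) :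
    chunksRec ts = [] := by
  rw [chunksRec]
  split
  · rfl
  · rename_i j heq
    rw [h] at heq
    cases heq

lemma chunksRec_some {ts : List String} {j : Nat}
    (h : PySem.List.index? ts ")" = some j) :
    chunksRec ts = ts.take (j + 1) :: chunksRec (ts.drop (j + 1)) := by
  rw [chunksRec]
  split
  · rename_i heq
    rw [h] at heq
    cases heq
  · rename_i j' heq
    rw [h] at heq
    cases heq
    rfl

lemma tcStepA_close (st : List (List String) × List String) :
    tcStepA st ")" = (st.1 ++ [st.2 ++ [")"]], []) := by
  simp [tcStepA]

lemma tcStepA_other (st : List (List String) × List String) {t : String} (ht : t ≠ ")") :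
    tcStepA st t = (st.1, st.2 ++ [t]) := by
  simp [tcStepA, ht]

def prepFst (a : List String) (l : List (List String)) : List (List String) :=
  match l with
  | [] => []
  | c :: cs => (a ++ c) :: cs

lemma prepFst_nil (l : List (List String)) : prepFst [] l = l := by
  cases l <;> simp [prepFst]

-- A's fold: the group component is a prefix plus the fold from an empty group
lemma foldA_group (ts : List String) (g : List (List String)) (a : List String) :
    (List.foldl tcStepA (g, a) ts).1 = g ++ (List.foldl tcStepA ([], a) ts).1 := by
  induction ts generalizing g a with
  | nil => simp
  | cons t ts ih =>
      by_cases ht : t = ")"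
      · subst ht
        rw [List.foldl_cons, List.foldl_cons, tcStepA_close, tcStepA_close]
        rw [ih (g ++ [a ++ [")"]]), ih ([] ++ [a ++ [")"]])]
        simp
      · rw [List.foldl_cons, List.foldl_cons, tcStepA_other _ ht, tcStepA_other _ ht]
        rw [ih g]

lemma foldA_chunksRec (ts : List String) (a : List String) :
    (List.foldl tcStepA ([], a) ts).1 = prepFst a (chunksRec ts) := by
  induction ts generalizing a with
  | nil =>
      rw [chunksRec_none (by rw [PySem.List.index?_eq_none_iff]; simp)]
      simp [prepFst]
  | cons t ts ih =>
      by_cases ht : t = ")"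
      · subst ht
        rw [chunksRec_some (PySem.List.index?_cons_self ")" ts)]
        rw [List.foldl_cons, tcStepA_close]
        rw [foldA_group, ih [], prepFst_nil]
        simp [prepFst]
      · rw [List.foldl_cons, tcStepA_other _ ht]
        rw [ih (a ++ [t])]
        cases hidx : PySem.List.index? ts ")" with
        | none =>
            rw [chunksRec_none hidx,
                chunksRec_none (by rw [PySem.List.index?_cons_of_ne ts ht, hidx]; rfl)]
            simp [prepFst]
        | some j =>
            rw [chunksRec_some hidx,
                chunksRec_some (ts := t :: ts) (j := j + 1)
                  (by rw [PySem.List.index?_cons_of_ne ts ht, hidx]; rfl)]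
            simp [prepFst]

-- B's loop: appends exactly the chunks of the remaining suffix
lemma altLoop_chunksRec (tokens : List String) (chunks : List (List String)) (start : Nat) :
    tcAltLoop tokens chunks start = chunks ++ chunksRec (tokens.drop start) := by
  induction chunks, start using tcAltLoop.induct tokens with
  | case1 chunks start h =>
      rw [PySem.List.slice_from_natCast] at h
      rw [tcAltLoop]
      split
      · rw [chunksRec_none h]; simp
      · rename_i j heq
        rw [PySem.List.slice_from_natCast, h] at heq
        cases heq
  | case2 chunks start j h ih =>
      rw [PySem.List.slice_from_natCast] at h
      rw [tcAltLoop]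
      split
      · rename_i heq
        rw [PySem.List.slice_from_natCast, h] at heq
        cases heq
      · rename_i j' heq
        rw [PySem.List.slice_from_natCast, h] at heq
        cases heq
        rw [ih, chunksRec_some h]
        have hsl : PySem.List.slice tokens (some ((start : Nat) : Int))
            (some (((start + j + 1 : Nat)) : Int)) = (tokens.drop start).take (j + 1) := by
          rw [PySem.List.slice_natCast]
          congr 1
          omega
        have hdr : (tokens.drop start).drop (j + 1) = tokens.drop (start + j + 1) := by
          rw [List.drop_drop]; ring_nf
        rw [hsl, hdr]
        simp

-- ===== VERDICT (by name: the statement is the Claim_ definition above) =====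
theorem token_chunks_py_spec : Claim_equal_token_chunks_py := by
  intro tokens _
  show token_chunks_py tokens = token_chunks_py_alt tokens
  unfold token_chunks_py token_chunks_py_alt
  rw [foldA_chunksRec tokens [], prepFst_nil, altLoop_chunksRec tokens [] 0]
  simp
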